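-- pv_equiv track=rewrite | github.com/manjumugali/Python_Programs | Utility/UtilityTest.py | notAnagramPrime
-- ===== SOURCE A (Python) =====
-- def notAnagramPrime(my_list):  # it takes list as parameter
--     my_list1 = []
--     for i in range(len(my_list)):  # i=0 to length of lis
--         temp1 = my_list[i]
--         for j in range(i + 1, len(my_list)):  # j=i+1 to length of list
--             temp = my_list[j]
--             if sorted(my_list[i]) != sorted(my_list[j]):  # if a[i] & a[j] are equal then anagram Number
--                 if my_list[i] not in my_list1:
--                     my_list1.append(my_list[i])
--
--     return my_list1
-- ===== SOURCE B (Python) =====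
-- def notAnagramPrime(my_list):
--     # Signatures once (O(n * L log L)), one right-to-left pass computing, for each
--     # position, whether some later element has a different signature, then one
--     # forward dedup pass.
--     sigs = [tuple(sorted(s)) for s in my_list]
--     n = len(my_list)
--     qual = [False] * n
--     state = None  # (sig of first element of the suffix to the right, suffix-diverse flag)
--     for i in range(n - 1, -1, -1):
--         if state is None:
--             qual[i] = False
--         else:
--             t0, d = state
--             qual[i] = d or t0 != sigs[i]
--         state = (sigs[i], qual[i])
--     result, seen = [], set()
--     for x, q in zip(my_list, qual):
--         if q and x not in seen:
--             result.append(x)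
--             seen.add(x)
--     return result
-- ===== Notes on version B (the rewrite author's own statement) =====
-- stated objective: faster
-- what changed: Replaces A's all-pairs nested scan (re-sorting each string on every comparison, with a linear membership test) by precomputing each string's sorted-character signature once, a single right-to-left pass tracking the suffix head signature and a diverse flag to mark elements with a later different-signature element, and one forward dedup pass with a set.
import Mathlib
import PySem

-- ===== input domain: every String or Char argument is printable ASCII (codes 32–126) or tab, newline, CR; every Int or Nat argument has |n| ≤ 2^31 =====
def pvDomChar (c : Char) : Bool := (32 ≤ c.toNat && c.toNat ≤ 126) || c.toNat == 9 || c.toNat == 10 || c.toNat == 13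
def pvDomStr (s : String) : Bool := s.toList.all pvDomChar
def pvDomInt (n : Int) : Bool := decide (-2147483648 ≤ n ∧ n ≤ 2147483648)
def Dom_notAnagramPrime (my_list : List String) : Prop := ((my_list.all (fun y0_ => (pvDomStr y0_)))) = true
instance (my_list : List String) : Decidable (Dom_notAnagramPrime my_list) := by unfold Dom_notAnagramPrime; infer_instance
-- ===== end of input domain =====

-- B replaces A's O(n^2) all-pairs signature comparison by one signature precomputation,
-- one right-to-left suffix pass and one forward dedup pass (objective: faster).

-- sorted(s) for a Python string: the sorted list of its characters
def pvSig (s : String) : List Char := PySem.List.sorted s.toList (fun c => c)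

-- ===== PORT A =====
def notAnagramPrime (my_list : List String) : List String :=
  (List.range my_list.length).foldl (fun my_list1 i =>
    (List.range' (i + 1) (my_list.length - (i + 1))).foldl (fun my_list1 j =>
      if pvSig (my_list.getD i "") ≠ pvSig (my_list.getD j "") then
        if my_list.getD i "" ∉ my_list1 then my_list1 ++ [my_list.getD i ""] else my_list1
      else my_list1) my_list1) []

-- ===== PORT B =====
-- one step of B's right-to-left pass: state = (sig of the suffix head, suffix-diverse flag), flags accumulated
def pvStep (sg : List Char) (st : Option (List Char × Bool) × List Bool) :
    Option (List Char × Bool) × List Bool :=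
  match st.1 with
  | none => (some (sg, false), false :: st.2)
  | some (t0, d) =>
      let q := d || decide (t0 ≠ sg)
      (some (sg, q), q :: st.2)

def notAnagramPrime_alt (my_list : List String) : List String :=
  let sigs := my_list.map pvSig
  let quals := (sigs.foldr pvStep (none, [])).2
  ((my_list.zip quals).foldl (fun (st : List String × PySem.Set String) xq =>
      if xq.2 && !(PySem.Set.contains st.2 xq.1) then (st.1 ++ [xq.1], PySem.Set.add st.2 xq.1)
      else st) ([], PySem.Set.empty)).1

-- ===== PRECONDITION & SPEC =====
def Spec_notAnagramPrime (my_list : List String) (out : List String) : Prop := out = notAnagramPrime_alt my_list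
instance (my_list : List String) (out : List String) : Decidable (Spec_notAnagramPrime my_list out) := by unfold Spec_notAnagramPrime; infer_instance

-- ===== CLAIM (what is proved, stated in full; the proofs are below) =====
def Claim_equal_notAnagramPrime : Prop := ∀ (my_list : List String), Dom_notAnagramPrime my_list → Spec_notAnagramPrime my_list (notAnagramPrime my_list)

-- ===== LEMMAS AND PROOFS =====

-- reference form shared by both proofs: x is kept iff some later element has a
-- different signature, with dedup against the accumulator
def refA : List String → List String → List String
  | acc, [] => acc
  | acc, x :: rest =>
      refA (if (∃ y ∈ rest, pvSig y ≠ pvSig x) ∧ x ∉ acc then acc ++ [x] else acc) rest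

-- A's inner loop appends x at most once, exactly when some scanned index has a different signature
lemma innerA (g : Nat → List Char) (sx : List Char) (x : String) :
    ∀ (js : List Nat) (acc : List String),
      js.foldl (fun acc j =>
        if sx ≠ g j then
          if x ∉ acc then acc ++ [x] else acc
        else acc) acc
      = if (∃ j ∈ js, g j ≠ sx) ∧ x ∉ acc then acc ++ [x] else acc := by
  intro js
  induction js with
  | nil => intro acc; simp
  | cons j js ih =>
    intro acc
    simp only [List.foldl_cons]
    by_cases hx : x ∈ acc
    · have h1 : (if sx ≠ g j then if x ∉ acc then acc ++ [x] else acc else acc) = acc := by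
        split_ifs <;> simp_all
      rw [h1, ih]
      simp [hx]
    · by_cases hd : g j ≠ sx
      · have h1 : (if sx ≠ g j then if x ∉ acc then acc ++ [x] else acc else acc) = acc ++ [x] := by
          simp [hx, Ne.symm hd]
        rw [h1, ih]
        have hmem : x ∈ acc ++ [x] := by simp
        simp [hmem, hx, hd]
      · rw [Decidable.not_not] at hd
        have h1 : (if sx ≠ g j then if x ∉ acc then acc ++ [x] else acc else acc) = acc := by
          simp [hd]
        rw [h1, ih]
        simp [hd, hx]

-- A's inner scan range, read as the suffix of the list
lemma drop_char (l : List String) (i : Nat) (hi : i < l.length) :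
    (∃ j ∈ List.range' (i + 1) (l.length - (i + 1)), pvSig (l.getD j "") ≠ pvSig (l.getD i ""))
      ↔ ∃ y ∈ l.drop (i + 1), pvSig y ≠ pvSig (l.getD i "") := by
  constructor
  · rintro ⟨j, hj, hne⟩
    rw [List.mem_range'_1] at hj
    have hjn : j < l.length := by omega
    refine ⟨l[j], ?_, ?_⟩
    · have : (l.drop (i + 1))[j - (i + 1)]'(by simp; omega) = l[j] := by
        rw [List.getElem_drop]; congr 1; omega
      rw [← this]; exact List.getElem_mem _
    · rwa [List.getD_eq_getElem l "" hjn] at hne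
  · rintro ⟨y, hy, hne⟩
    rw [List.mem_iff_getElem] at hy
    obtain ⟨m, hm, hym⟩ := hy
    refine ⟨i + 1 + m, ?_, ?_⟩
    · rw [List.mem_range'_1]
      simp at hm
      omega
    · have hlt : i + 1 + m < l.length := by simp at hm; omega
      rw [List.getD_eq_getElem l "" hlt, ← List.getElem_drop (h := hm), hym]
      exact hne

-- A's outer index loop, with the inner loop already summarised, is refA
lemma foldA : ∀ (l : List String) (acc : List String),
    (List.range l.length).foldl (fun acc i =>
      if (∃ y ∈ l.drop (i + 1), pvSig y ≠ pvSig (l.getD i "")) ∧ l.getD i "" ∉ acc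
      then acc ++ [l.getD i ""] else acc) acc = refA acc l := by
  intro l
  induction l with
  | nil => intro acc; simp [refA]
  | cons x rest ih =>
    intro acc
    rw [List.length_cons, List.range_succ_eq_map, List.foldl_cons, List.foldl_map]
    simp only [List.getD_cons_zero, List.drop_succ_cons, List.drop_zero, List.getD_cons_succ,
      Nat.succ_eq_add_one]
    rw [refA]
    exact ih _

lemma A_eq_ref (l : List String) : notAnagramPrime l = refA [] l := by
  unfold notAnagramPrime
  rw [PySem.List.foldl_congr_mem (List.range l.length) _
    (fun acc i => if (∃ y ∈ l.drop (i + 1), pvSig y ≠ pvSig (l.getD i "")) ∧ l.getD i "" ∉ acc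
      then acc ++ [l.getD i ""] else acc) [] ?_, foldA]
  intro acc i hi
  rw [List.mem_range] at hi
  rw [innerA (fun j => pvSig (l.getD j "")) (pvSig (l.getD i "")) (l.getD i "")]
  rw [if_congr (iff_of_eq (congrArg (· ∧ l.getD i "" ∉ acc) (propext (drop_char l i hi)))) rfl rfl]

-- the per-position flags B's right-to-left pass produces, stated positionally
def flagsSpec : List (List Char) → List Bool
  | [] => []
  | sg :: rest => decide (∃ t ∈ rest, t ≠ sg) :: flagsSpec rest

lemma exists_ne_cons (sg sg' : List Char) (rest' : List (List Char)) :
    (∃ t ∈ sg' :: rest', t ≠ sg) ↔ (∃ t ∈ rest', t ≠ sg') ∨ sg' ≠ sg := by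
  constructor
  · rintro ⟨t, ht, hne⟩
    rcases List.mem_cons.mp ht with h | h
    · right; rw [← h]; exact hne
    · by_cases hs : sg' = sg
      · left; exact ⟨t, h, by rw [hs]; exact hne⟩
      · right; exact hs
  · rintro (⟨t, ht, hne⟩ | h)
    · by_cases hs : sg' = sg
      · exact ⟨t, List.mem_cons_of_mem _ ht, by rw [← hs]; exact hne⟩
      · exact ⟨sg', List.mem_cons_self, hs⟩
    · exact ⟨sg', List.mem_cons_self, h⟩

lemma pass_spec : ∀ (sgs : List (List Char)),
    sgs.foldr pvStep (none, []) =
      ((match sgs with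
        | [] => none
        | sg :: rest => some (sg, decide (∃ t ∈ rest, t ≠ sg))), flagsSpec sgs) := by
  intro sgs
  induction sgs with
  | nil => rfl
  | cons sg rest ih =>
    rw [List.foldr_cons, ih]
    cases rest with
    | nil => simp [pvStep, flagsSpec]
    | cons sg' rest' =>
      have hq : (decide (∃ t ∈ rest', t ≠ sg') || decide (sg' ≠ sg)) = decide (∃ t ∈ sg' :: rest', t ≠ sg) := by
        rw [← Bool.decide_or, decide_eq_decide]
        exact (exists_ne_cons sg sg' rest').symm
      show (some (sg, decide (∃ t ∈ rest', t ≠ sg') || decide (sg' ≠ sg)),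
            (decide (∃ t ∈ rest', t ≠ sg') || decide (sg' ≠ sg)) :: flagsSpec (sg' :: rest')) =
           (some (sg, decide (∃ t ∈ sg' :: rest', t ≠ sg)), flagsSpec (sg :: sg' :: rest'))
      rw [hq]
      rfl

-- B's forward dedup pass is refA, under the invariant "seen = the set of appended values"
lemma B_fold : ∀ (l : List String) (acc seen : List String),
    (∀ x, x ∈ seen ↔ x ∈ acc) →
    ((l.zip (flagsSpec (l.map pvSig))).foldl (fun (st : List String × PySem.Set String) xq =>
        if xq.2 && !(PySem.Set.contains st.2 xq.1) then (st.1 ++ [xq.1], PySem.Set.add st.2 xq.1)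
        else st) (acc, seen)).1 = refA acc l := by
  intro l
  induction l with
  | nil => intro acc seen h; simp [refA]
  | cons x rest ih =>
    intro acc seen h
    simp only [List.map_cons, flagsSpec, List.zip_cons_cons, List.foldl_cons]
    rw [refA]
    have hflag : (decide (∃ t ∈ rest.map pvSig, t ≠ pvSig x) = true) ↔ (∃ y ∈ rest, pvSig y ≠ pvSig x) := by
      simp
    have hcont : (PySem.Set.contains seen x = true) ↔ x ∈ acc := by
      rw [← h x]
      exact List.contains_iff_mem
    by_cases hc : (∃ y ∈ rest, pvSig y ≠ pvSig x) ∧ x ∉ acc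
    · have hfalse : PySem.Set.contains seen x = false := by
        rcases Bool.eq_false_or_eq_true (PySem.Set.contains seen x) with h1 | h0
        · exact absurd (hcont.mp h1) hc.2
        · exact h0
      have ht : decide (∃ t ∈ rest.map pvSig, t ≠ pvSig x) = true := hflag.mpr hc.1
      have : (decide (∃ t ∈ rest.map pvSig, t ≠ pvSig x) && !(PySem.Set.contains seen x)) = true := by
        rw [ht, hfalse]
        rfl
      rw [if_pos this, if_pos hc]
      exact ih _ _ (fun y => by
        rw [PySem.Set.mem_add, h y, List.mem_append, List.mem_singleton])
    · have : (decide (∃ t ∈ rest.map pvSig, t ≠ pvSig x) && !(PySem.Set.contains seen x)) = false := by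
        rcases Decidable.not_and_iff_not_or_not.mp hc with h1 | h1
        · have hf : decide (∃ t ∈ rest.map pvSig, t ≠ pvSig x) = false := by
            rw [decide_eq_false_iff_not]
            intro hex
            exact h1 (hflag.mp (decide_eq_true hex))
          rw [hf, Bool.false_and]
        · have htc : PySem.Set.contains seen x = true := hcont.mpr (Decidable.not_not.mp h1)
          rw [htc, Bool.not_true, Bool.and_false]
      rw [this, if_neg hc]
      simp only [Bool.false_eq_true, if_false]
      exact ih _ _ h

lemma B_eq_ref (l : List String) : notAnagramPrime_alt l = refA [] l := by
  show ((l.zip ((List.foldr pvStep (none, []) (l.map pvSig)).2)).foldl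
      (fun (st : List String × PySem.Set String) xq =>
        if xq.2 && !(PySem.Set.contains st.2 xq.1) then (st.1 ++ [xq.1], PySem.Set.add st.2 xq.1)
        else st) ([], PySem.Set.empty)).1 = refA [] l
  rw [pass_spec]
  exact B_fold l [] [] (fun x => Iff.rfl)

-- ===== VERDICT (by name: the statement is the Claim_ definition above) =====
theorem notAnagramPrime_spec : Claim_equal_notAnagramPrime := by
  intro l _
  unfold Spec_notAnagramPrime
  rw [A_eq_ref, B_eq_ref]
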